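-- pv_equiv track=rewrite | github.com/vaanij943/student-grade-analyzer | main.py | letter_distribution
-- ===== SOURCE A (Python) =====
-- def letter_distribution(scores):
--     dist = {"A": 0, "B": 0, "C": 0, "D": 0, "F": 0}
--     for s in scores:
--         if s >= 90:
--             dist["A"] += 1
--         elif s >= 80:
--             dist["B"] += 1
--         elif s >= 70:
--             dist["C"] += 1
--         elif s >= 60:
--             dist["D"] += 1
--         else:
--             dist["F"] += 1
--     return dist
-- ===== SOURCE B (Python) =====
-- def letter_distribution(scores):
--     ge90 = sum(1 for s in scores if s >= 90)
--     ge80 = sum(1 for s in scores if s >= 80)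
--     ge70 = sum(1 for s in scores if s >= 70)
--     ge60 = sum(1 for s in scores if s >= 60)
--     return {
--         "A": ge90,
--         "B": ge80 - ge90,
--         "C": ge70 - ge80,
--         "D": ge60 - ge70,
--         "F": len(scores) - ge60,
--     }
-- ===== Notes on version B (the rewrite author's own statement) =====
-- stated objective: alternative
-- what changed: Replaces the per-element if/elif bucketing loop and mutable dict with staged aggregate passes: four cumulative threshold counts (ge90..ge60) are taken over the whole list and the five bucket sizes are recovered as differences of consecutive cumulative counts.
import Mathlib
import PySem

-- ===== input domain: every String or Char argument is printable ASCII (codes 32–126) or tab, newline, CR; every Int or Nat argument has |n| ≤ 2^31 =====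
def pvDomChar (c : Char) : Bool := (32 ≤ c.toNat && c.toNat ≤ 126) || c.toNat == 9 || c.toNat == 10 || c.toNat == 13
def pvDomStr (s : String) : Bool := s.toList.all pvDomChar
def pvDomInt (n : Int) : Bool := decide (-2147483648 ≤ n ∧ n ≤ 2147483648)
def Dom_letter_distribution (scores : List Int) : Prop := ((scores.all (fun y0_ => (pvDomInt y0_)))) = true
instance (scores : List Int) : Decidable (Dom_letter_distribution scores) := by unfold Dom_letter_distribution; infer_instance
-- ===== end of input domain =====

-- B replaces A's per-element if/elif bucketing loop with staged passes: cumulative threshold counts whose consecutive differences are the buckets; same cost, different decomposition.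


-- ===== PORT A =====
def letter_distribution (scores : List Int) : List (String × Int) :=
  (scores.foldl (fun dist s =>
    if s ≥ 90 then dist.modify "A" 0 (· + 1)
    else if s ≥ 80 then dist.modify "B" 0 (· + 1)
    else if s ≥ 70 then dist.modify "C" 0 (· + 1)
    else if s ≥ 60 then dist.modify "D" 0 (· + 1)
    else dist.modify "F" 0 (· + 1))
    (PySem.Dict.ofList [("A", 0), ("B", 0), ("C", 0), ("D", 0), ("F", 0)])).items

-- ===== PORT B =====
-- sum(1 for s in scores if s >= t)
def ldCountGe (t : Int) (scores : List Int) : Int :=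
  scores.foldl (fun acc s => if s ≥ t then acc + 1 else acc) 0

def letter_distribution_alt (scores : List Int) : List (String × Int) :=
  let ge90 := ldCountGe 90 scores
  let ge80 := ldCountGe 80 scores
  let ge70 := ldCountGe 70 scores
  let ge60 := ldCountGe 60 scores
  [("A", ge90), ("B", ge80 - ge90), ("C", ge70 - ge80),
   ("D", ge60 - ge70), ("F", (scores.length : Int) - ge60)]

-- ===== PRECONDITION & SPEC =====
def Spec_letter_distribution (scores : List Int) (out : List (String × Int)) : Prop := out = letter_distribution_alt scores
instance (scores : List Int) (out : List (String × Int)) : Decidable (Spec_letter_distribution scores out) := by unfold Spec_letter_distribution; infer_instance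

-- ===== CLAIM (what is proved, stated in full; the proofs are below) =====
def Claim_equal_letter_distribution : Prop := ∀ (scores : List Int), Dom_letter_distribution scores → Spec_letter_distribution scores (letter_distribution scores)

-- ===== LEMMAS AND PROOFS =====

lemma ldCountGe_shift (t : Int) (l : List Int) (a : Int) :
    l.foldl (fun acc s => if s ≥ t then acc + 1 else acc) a = a + ldCountGe t l := by
  induction l generalizing a with
  | nil => simp [ldCountGe]
  | cons x xs ih =>
    simp only [ldCountGe, List.foldl_cons]
    rw [ih, ih]
    split_ifs <;> ring

lemma ldCountGe_cons (t s : Int) (rest : List Int) :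
    ldCountGe t (s :: rest) = (if s ≥ t then 1 else 0) + ldCountGe t rest := by
  have h0 : ldCountGe t (s :: rest)
      = rest.foldl (fun acc x => if x ≥ t then acc + 1 else acc) (if s ≥ t then 0 + 1 else 0) := rfl
  rw [h0, ldCountGe_shift]
  split_ifs <;> ring

lemma ldModA (a b c d f : Int) :
    (PySem.Dict.ofList [("A", a), ("B", b), ("C", c), ("D", d), ("F", f)]).modify "A" 0 (· + 1)
      = PySem.Dict.ofList [("A", a + 1), ("B", b), ("C", c), ("D", d), ("F", f)] := rfl

lemma ldModB (a b c d f : Int) :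
    (PySem.Dict.ofList [("A", a), ("B", b), ("C", c), ("D", d), ("F", f)]).modify "B" 0 (· + 1)
      = PySem.Dict.ofList [("A", a), ("B", b + 1), ("C", c), ("D", d), ("F", f)] := rfl

lemma ldModC (a b c d f : Int) :
    (PySem.Dict.ofList [("A", a), ("B", b), ("C", c), ("D", d), ("F", f)]).modify "C" 0 (· + 1)
      = PySem.Dict.ofList [("A", a), ("B", b), ("C", c + 1), ("D", d), ("F", f)] := rfl

lemma ldModD (a b c d f : Int) :
    (PySem.Dict.ofList [("A", a), ("B", b), ("C", c), ("D", d), ("F", f)]).modify "D" 0 (· + 1)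
      = PySem.Dict.ofList [("A", a), ("B", b), ("C", c), ("D", d + 1), ("F", f)] := rfl

lemma ldModF (a b c d f : Int) :
    (PySem.Dict.ofList [("A", a), ("B", b), ("C", c), ("D", d), ("F", f)]).modify "F" 0 (· + 1)
      = PySem.Dict.ofList [("A", a), ("B", b), ("C", c), ("D", d), ("F", f + 1)] := rfl

lemma ld_fold_items (scores : List Int) : ∀ (a b c d f : Int),
    ((scores.foldl (fun dist s =>
      if s ≥ 90 then dist.modify "A" 0 (· + 1)
      else if s ≥ 80 then dist.modify "B" 0 (· + 1)
      else if s ≥ 70 then dist.modify "C" 0 (· + 1)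
      else if s ≥ 60 then dist.modify "D" 0 (· + 1)
      else dist.modify "F" 0 (· + 1))
      (PySem.Dict.ofList [("A", a), ("B", b), ("C", c), ("D", d), ("F", f)])).items) =
    [("A", a + ldCountGe 90 scores),
     ("B", b + (ldCountGe 80 scores - ldCountGe 90 scores)),
     ("C", c + (ldCountGe 70 scores - ldCountGe 80 scores)),
     ("D", d + (ldCountGe 60 scores - ldCountGe 70 scores)),
     ("F", f + ((scores.length : Int) - ldCountGe 60 scores))] := by
  induction scores with
  | nil =>
    intro a b c d f
    simp only [List.foldl_nil, ldCountGe, List.length_nil, Nat.cast_zero, sub_self,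
      add_zero]
    rfl
  | cons s rest ih =>
    intro a b c d f
    rw [List.foldl_cons]
    simp only [List.length_cons,
      ldCountGe_cons 90 s rest, ldCountGe_cons 80 s rest,
      ldCountGe_cons 70 s rest, ldCountGe_cons 60 s rest]
    by_cases h90 : s ≥ 90
    · rw [if_pos h90, ldModA a b c d f, ih]
      have h80 : s ≥ 80 := by omega
      have h70 : s ≥ 70 := by omega
      have h60 : s ≥ 60 := by omega
      simp only [if_pos h90, if_pos h80, if_pos h70, if_pos h60, List.cons.injEq, Prod.mk.injEq, Nat.cast_add, Nat.cast_one]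
      and_intros <;> first | rfl | (push_cast; try ring)
    · rw [if_neg h90]
      by_cases h80 : s ≥ 80
      · rw [if_pos h80, ldModB a b c d f, ih]
        have h70 : s ≥ 70 := by omega
        have h60 : s ≥ 60 := by omega
        simp only [if_neg h90, if_pos h80, if_pos h70, if_pos h60, List.cons.injEq, Prod.mk.injEq, Nat.cast_add, Nat.cast_one]
        and_intros <;> first | rfl | (push_cast; try ring)
      · rw [if_neg h80]
        by_cases h70 : s ≥ 70
        · rw [if_pos h70, ldModC a b c d f, ih]
          have h60 : s ≥ 60 := by omega
          simp only [if_neg h90, if_neg h80, if_pos h70, if_pos h60, List.cons.injEq, Prod.mk.injEq, Nat.cast_add, Nat.cast_one]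
          and_intros <;> first | rfl | (push_cast; try ring)
        · rw [if_neg h70]
          by_cases h60 : s ≥ 60
          · rw [if_pos h60, ldModD a b c d f, ih]
            simp only [if_neg h90, if_neg h80, if_neg h70, if_pos h60, List.cons.injEq, Prod.mk.injEq, Nat.cast_add, Nat.cast_one]
            and_intros <;> first | rfl | (push_cast; try ring)
          · rw [if_neg h60, ldModF a b c d f, ih]
            simp only [if_neg h90, if_neg h80, if_neg h70, if_neg h60, List.cons.injEq, Prod.mk.injEq, Nat.cast_add, Nat.cast_one]
            and_intros <;> first | rfl | (push_cast; try ring)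

-- ===== VERDICT (by name: the statement is the Claim_ definition above) =====
theorem letter_distribution_spec : Claim_equal_letter_distribution := by
  intro scores _
  unfold Spec_letter_distribution letter_distribution letter_distribution_alt
  rw [ld_fold_items scores 0 0 0 0 0]
  simp
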